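-- pv_equiv track=rewrite | github.com/Yash114Bansal/CP-Problems | CodeChef/START93/4.py | count_palindrome_pairs
-- ===== SOURCE A (Python) =====
-- def is_palindrome(num):
--     if not num:
--         return True
--     return str(num) == str(num)[::-1]
--
-- def count_palindrome_pairs(arr):
--     count = 0
--     xor_count = {}
--     n = len(arr)
--     for i in range(n):
--         for key in xor_count:
--             if is_palindrome(arr[i] ^ key):
--                 count += xor_count[key]
--         xor_value = arr[i]
--         if xor_value in xor_count:
--             xor_count[xor_value] += 1
--         else:
--             xor_count[xor_value] = 1
--     return count+len(arr)
-- ===== SOURCE B (Python) =====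
-- def is_palindrome(num):
--     if not num:
--         return True
--     return str(num) == str(num)[::-1]
--
-- def count_palindrome_pairs(arr):
--     # Count multiplicities once, then loop over unordered pairs of DISTINCT
--     # values; equal-value pairs contribute the triangular number c*(c-1)//2
--     # (their XOR is 0, a palindrome).
--     cnt = {}
--     for v in arr:
--         cnt[v] = cnt.get(v, 0) + 1
--     items = list(cnt.items())
--     total = len(arr)
--     while items:
--         u, cu = items.pop(0)
--         total += cu * (cu - 1) // 2
--         for w, cw in items:
--             if is_palindrome(u ^ w):
--                 total += cu * cw
--     return total
-- ===== Notes on version B (the rewrite author's own statement) =====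
-- stated objective: alternative
-- what changed: B replaces A's online pass (for each element, scan the dict of all previously seen values) by a two-phase algorithm: build a multiplicity counter of the whole array once, then loop over unordered pairs of DISTINCT values, adding cu*cw per palindromic-XOR value pair and the triangular number c*(c-1)//2 for equal-value pairs (XOR 0 is a palindrome).
import Mathlib
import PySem

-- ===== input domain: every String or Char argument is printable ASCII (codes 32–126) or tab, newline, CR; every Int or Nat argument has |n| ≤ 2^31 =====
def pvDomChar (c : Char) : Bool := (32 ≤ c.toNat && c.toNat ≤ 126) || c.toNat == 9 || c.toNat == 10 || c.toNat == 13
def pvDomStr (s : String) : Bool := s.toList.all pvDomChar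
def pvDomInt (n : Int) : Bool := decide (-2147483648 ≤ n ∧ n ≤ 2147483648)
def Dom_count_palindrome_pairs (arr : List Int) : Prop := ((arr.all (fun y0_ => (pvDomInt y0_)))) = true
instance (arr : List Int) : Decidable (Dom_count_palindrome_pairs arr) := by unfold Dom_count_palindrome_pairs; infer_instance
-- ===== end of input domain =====

-- B counts pairs from a multiplicity counter of the distinct values instead of A's
-- per-element scan of the dict of previously seen values (objective: alternative algorithm).

-- ===== PORT A =====
-- is_palindrome(num): shared helper of both ports (identical source in Source A and Source B)
def pyIsPal (num : Int) : Bool :=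
  if num == 0 then true
  else
    -- str(num) == str(num)[::-1]; strings handled as char lists (PySem.Int.toChars = str(num))
    PySem.Int.toChars num == (PySem.List.slice? (PySem.Int.toChars num) none none (-1)).getD []

-- body of A's outer loop, applied to arr[i]; st = (count, xor_count)
def cppStep (st : Int × PySem.Dict Int Int) (ai : Int) : Int × PySem.Dict Int Int :=
  let count := st.2.keys.foldl
    (fun c key => if pyIsPal (PySem.Int.bxor ai key) then c + st.2.getD key 0 else c) st.1
  let xc := if st.2.contains ai then st.2.modify ai 0 (· + 1) else st.2.insert ai 1
  (count, xc)

def count_palindrome_pairs (arr : List Int) : Int :=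
  let n := PySem.List.len arr
  let res := (PySem.List.pyRange 0 n 1).foldl
    (fun st i => cppStep st (PySem.List.pyGetD arr i 0)) (0, PySem.Dict.empty)
  res.1 + PySem.List.len arr

-- ===== PORT B =====
-- the 'while items: u, cu = items.pop(0); …' loop of Source B, carrying the running total
def cpPairs : List (Int × Int) → Int → Int
  | [], total => total
  | (u, cu) :: rest, total =>
      cpPairs rest
        (rest.foldl (fun t p => if pyIsPal (PySem.Int.bxor u p.1) then t + cu * p.2 else t)
          (total + PySem.Int.floordiv (cu * (cu - 1)) 2))

def count_palindrome_pairs_alt (arr : List Int) : Int :=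
  let cnt := arr.foldl (fun d v => d.insert v (d.getD v 0 + 1)) (PySem.Dict.empty : PySem.Dict Int Int)
  cpPairs cnt.items (PySem.List.len arr)

-- ===== PRECONDITION & SPEC =====
def Spec_count_palindrome_pairs (arr : List Int) (out : Int) : Prop := out = count_palindrome_pairs_alt arr
instance (arr : List Int) (out : Int) : Decidable (Spec_count_palindrome_pairs arr out) := by unfold Spec_count_palindrome_pairs; infer_instance

-- ===== CLAIM (what is proved, stated in full; the proofs are below) =====
def Claim_equal_count_palindrome_pairs : Prop := ∀ (arr : List Int), Dom_count_palindrome_pairs arr → Spec_count_palindrome_pairs arr (count_palindrome_pairs arr)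

-- ===== LEMMAS AND PROOFS =====

-- number of elements w of xs with is_palindrome(v ^ w), as an Int
def mcount (v : Int) (xs : List Int) : Int :=
  ((xs.countP (fun w => pyIsPal (PySem.Int.bxor v w))) : Int)

-- pair count accumulated by A's loop: prefix already processed, remaining elements
def N : List Int → List Int → Int
  | _, [] => 0
  | pre, v :: r => mcount v pre + N (pre ++ [v]) r

-- pure value added by B's pair loop over an items list
def Q : List (Int × Int) → Int
  | [] => 0
  | (u, cu) :: r =>
      cu * (cu - 1) / 2
        + (r.map (fun p => if pyIsPal (PySem.Int.bxor u p.1) then cu * p.2 else 0)).sum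
        + Q r

-- accumulate-if loop = acc + sum of guarded terms
theorem foldl_if_add {α : Type} (l : List α) (g : α → Bool) (h : α → Int) (a : Int) :
    l.foldl (fun c x => if g x then c + h x else c) a
      = a + (l.map (fun x => if g x then h x else 0)).sum := by
  induction l generalizing a with
  | nil => simp
  | cons x l ih => by_cases hg : g x <;> simp [hg, ih, add_assoc]

-- a sum over a Nodup list whose summand changes only at one member
theorem sum_map_update (l : List Int) (f g : Int → Int) (v c : Int)
    (hnd : l.Nodup) (hv : v ∈ l)
    (hfg : ∀ k ∈ l, k ≠ v → f k = g k) (hfv : f v = g v + c) :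
    (l.map f).sum = (l.map g).sum + c := by
  induction l with
  | nil => simp at hv
  | cons x l ih =>
    rcases List.mem_cons.mp hv with rfl | hv'
    · have : l.map f = l.map g := by
        apply List.map_congr_left
        intro k hk
        exact hfg k (List.mem_cons_of_mem _ hk) (fun h => (List.nodup_cons.mp hnd).1 (h ▸ hk))
      simp [this, hfv]; ring
    · have hx : f x = g x := hfg x (List.mem_cons_self) (fun h => (List.nodup_cons.mp hnd).1 (h ▸ hv'))
      have := ih (List.nodup_cons.mp hnd).2 hv' (fun k hk => hfg k (List.mem_cons_of_mem _ hk))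
      simp [hx, this]; ring

theorem mcount_snoc (v : Int) (xs : List Int) (w : Int) :
    mcount v (xs ++ [w]) = mcount v xs + (if pyIsPal (PySem.Int.bxor v w) then 1 else 0) := by
  simp [mcount, List.countP_append, List.countP_cons]

-- weighted sum over the distinct values = plain count over the list
theorem L1 (xs : List Int) (v : Int) :
    ((PySem.Set.ofList xs).map
      (fun k => if pyIsPal (PySem.Int.bxor v k) then ((xs.count k : Nat) : Int) else 0)).sum
      = mcount v xs := by
  induction xs using List.reverseRecOn with
  | nil => simp [mcount]
  | append_singleton xs w ih =>
    rw [PySem.Set.ofList_append_singleton, mcount_snoc]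
    by_cases hw : w ∈ PySem.Set.ofList xs
    · rw [PySem.Set.add_of_mem hw]
      rw [sum_map_update (PySem.Set.ofList xs)
            (fun k => if pyIsPal (PySem.Int.bxor v k) then (((xs ++ [w]).count k : Nat) : Int) else 0)
            (fun k => if pyIsPal (PySem.Int.bxor v k) then ((xs.count k : Nat) : Int) else 0)
            w (if pyIsPal (PySem.Int.bxor v w) then 1 else 0)
            (PySem.Set.nodup_ofList xs) hw ?hfg ?hfv, ih]
      case hfg =>
        intro k _ hk
        have hc : List.count k (xs ++ [w]) = List.count k xs := by
          simp [List.count_append, List.count_singleton']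
          exact fun h => hk h.symm
        simp only [hc]
      case hfv =>
        have hc : List.count w (xs ++ [w]) = List.count w xs + 1 := by
          simp [List.count_append]
        simp only [hc]
        by_cases h : pyIsPal (PySem.Int.bxor v w) <;> simp [h]
    · rw [PySem.Set.add_of_not_mem hw]
      have hwxs : w ∉ xs := fun h => hw ((PySem.Set.mem_ofList _ _).mpr h)
      rw [List.map_append, List.sum_append]
      have hcongr : (PySem.Set.ofList xs).map
            (fun k => if pyIsPal (PySem.Int.bxor v k) then (((xs ++ [w]).count k : Nat) : Int) else 0)
          = (PySem.Set.ofList xs).map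
            (fun k => if pyIsPal (PySem.Int.bxor v k) then ((xs.count k : Nat) : Int) else 0) := by
        apply List.map_congr_left
        intro k hk
        have hkw : k ≠ w := fun h => hw (h ▸ hk)
        have : (xs ++ [w]).count k = xs.count k := by
          rw [List.count_append]
          simp [hkw.symm]
        rw [this]
      have hcw : (xs ++ [w]).count w = 1 := by
        rw [List.count_append]
        simp [List.count_eq_zero_of_not_mem hwxs]
      rw [hcongr, ih]
      simp [List.count_eq_zero_of_not_mem hwxs]

-- triangular-number step
theorem tri_succ (a : Int) : (a + 1) * a / 2 = a * (a - 1) / 2 + a := by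
  have h : (a + 1) * a = a * (a - 1) + a * 2 := by ring
  rw [h, Int.add_mul_ediv_right _ _ (by norm_num : (2:Int) ≠ 0)]

-- A's loop invariant
theorem A1 (xs : List Int) (pre : List Int) (c : Int) :
    (xs.foldl cppStep (c, PySem.Dict.counter pre)).1 = c + N pre xs := by
  induction xs generalizing pre c with
  | nil => simp [N]
  | cons v xs ih =>
    have hstep : cppStep (c, PySem.Dict.counter pre) v
        = (c + mcount v pre, PySem.Dict.counter (pre ++ [v])) := by
      unfold cppStep
      simp only [PySem.Dict.keys_counter, PySem.Dict.getD_counter]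
      rw [foldl_if_add (PySem.Set.ofList pre)
            (fun k => pyIsPal (PySem.Int.bxor v k)) (fun k => ((pre.count k : Nat) : Int)) c,
          L1]
      rw [PySem.Dict.counter_append_singleton]
      by_cases hc : (PySem.Dict.counter pre).contains v
      · simp [hc]
      · have hc' : (PySem.Dict.counter pre).contains v = false := by simpa using hc
        have hmod : (PySem.Dict.counter pre).modify v 0 (· + 1)
            = (PySem.Dict.counter pre).insert v ((PySem.Dict.counter pre).getD v 0 + 1) := rfl
        have hg0 : (PySem.Dict.counter pre).getD v 0 = 0 := by
          simp [PySem.Dict.getD_of_not_contains, hc']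
        simp [hc, hmod, hg0]
    rw [List.foldl_cons, hstep, ih, N]
    ring

-- B's loop with the running total split off
theorem B1 (l : List (Int × Int)) (t : Int) : cpPairs l t = t + Q l := by
  induction l generalizing t with
  | nil => simp [cpPairs, Q]
  | cons p l ih =>
    obtain ⟨u, cu⟩ := p
    rw [cpPairs, ih, foldl_if_add, Q, PySem.Int.floordiv_eq_ediv_of_pos (by norm_num)]
    ring

theorem N_snoc (xs : List Int) (v : Int) (pre : List Int) :
    N pre (xs ++ [v]) = N pre xs + mcount v (pre ++ xs) := by
  induction xs generalizing pre with
  | nil => simp [N]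
  | cons x xs ih => simp [N, ih, List.append_assoc, add_assoc]

theorem Q_append_one (l : List (Int × Int)) (v c : Int) :
    Q (l ++ [(v, c)])
      = Q l + (l.map (fun p => if pyIsPal (PySem.Int.bxor p.1 v) then p.2 * c else 0)).sum
          + c * (c - 1) / 2 := by
  induction l with
  | nil => simp [Q]
  | cons p l ih =>
    obtain ⟨u, cu⟩ := p
    simp only [List.cons_append, Q, ih, List.map_append, List.map_cons, List.map_nil,
      List.sum_append, List.sum_cons, List.sum_nil]
    by_cases h : pyIsPal (PySem.Int.bxor u v) <;> simp [h, mul_comm] <;> ring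

-- Q after incrementing the multiplicity of one present key
theorem Q_update (s : List Int) (f g : Int → Int) (v : Int)
    (hnd : s.Nodup) (hv : v ∈ s)
    (hfg : ∀ k ∈ s, k ≠ v → f k = g k) (hfv : f v = g v + 1) :
    Q (s.map (fun k => (k, f k)))
      = Q (s.map (fun k => (k, g k)))
          + (s.map (fun k => if pyIsPal (PySem.Int.bxor v k) then g k else 0)).sum := by
  induction s with
  | nil => simp at hv
  | cons x s ih =>
    have hnd' := (List.nodup_cons.mp hnd).2
    have hxnots := (List.nodup_cons.mp hnd).1
    rcases List.mem_cons.mp hv with rfl | hv'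
    · -- head is the updated key
      have htail : s.map (fun k => (k, f k)) = s.map (fun k => (k, g k)) := by
        apply List.map_congr_left
        intro k hk
        rw [hfg k (List.mem_cons_of_mem _ hk) (fun h => hxnots (h ▸ hk))]
      simp only [List.map_cons, Q, htail, hfv]
      have hpal0 : pyIsPal (PySem.Int.bxor v v) = true := by
        rw [PySem.Int.bxor_self]; rfl
      have htri : (g v + 1) * (g v + 1 - 1) / 2 = g v * (g v - 1) / 2 + g v := by
        have : g v + 1 - 1 = g v := by ring
        rw [this, tri_succ]
      have hinner : ((s.map (fun k => (k, g k))).map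
            (fun p => if pyIsPal (PySem.Int.bxor v p.1) then (g v + 1) * p.2 else 0)).sum
          = ((s.map (fun k => (k, g k))).map
            (fun p => if pyIsPal (PySem.Int.bxor v p.1) then g v * p.2 else 0)).sum
            + ((s.map (fun k => if pyIsPal (PySem.Int.bxor v k) then g k else 0))).sum := by
        rw [List.map_map, List.map_map]
        have hpt : s.map ((fun p => if pyIsPal (PySem.Int.bxor v p.1) then (g v + 1) * p.2 else 0)
              ∘ (fun k => (k, g k)))
            = s.map (fun k => ((if pyIsPal (PySem.Int.bxor v k) then g v * g k else 0)
                + (if pyIsPal (PySem.Int.bxor v k) then g k else 0))) := by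
          apply List.map_congr_left
          intro k _
          simp only [Function.comp]
          by_cases h : pyIsPal (PySem.Int.bxor v k) <;> simp [h]
          ring
        rw [hpt, List.sum_map_add]
        congr 1
      rw [htri, hinner]
      simp only [List.sum_cons, hpal0, if_true]
      ring
    · -- head is another key
      have hx : f x = g x := hfg x (List.mem_cons_self) (fun h => hxnots (h ▸ hv'))
      simp only [List.map_cons, Q, hx]
      rw [ih hnd' hv' (fun k hk => hfg k (List.mem_cons_of_mem _ hk))]
      have hsum : ((s.map (fun k => (k, f k))).map
            (fun p => if pyIsPal (PySem.Int.bxor x p.1) then g x * p.2 else 0)).sum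
          = ((s.map (fun k => (k, g k))).map
            (fun p => if pyIsPal (PySem.Int.bxor x p.1) then g x * p.2 else 0)).sum
            + (if pyIsPal (PySem.Int.bxor v x) then g x else 0) := by
        rw [List.map_map, List.map_map]
        apply sum_map_update s _ _ v _ hnd' hv'
        · intro k hk hkv
          simp only [Function.comp]
          rw [hfg k (List.mem_cons_of_mem _ hk) hkv]
        · simp only [Function.comp, hfv]
          rw [PySem.Int.bxor_comm v x]
          by_cases h : pyIsPal (PySem.Int.bxor x v) <;> simp [h]
          ring
      rw [hsum]
      simp only [List.sum_cons]
      ring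

-- B's pair loop over the full counter computes A's accumulated pair count
theorem B2 (xs : List Int) : Q (PySem.Dict.counter xs).items = N [] xs := by
  induction xs using List.reverseRecOn with
  | nil => rfl
  | append_singleton xs v ih =>
    have hN : N [] (xs ++ [v]) = N [] xs + mcount v xs := by
      rw [N_snoc]; rfl
    rw [PySem.Dict.items_counter, PySem.Set.ofList_append_singleton, hN]
    rw [PySem.Dict.items_counter] at ih
    by_cases hv : v ∈ xs
    · have hvs : v ∈ PySem.Set.ofList xs := (PySem.Set.mem_ofList _ _).mpr hv
      rw [PySem.Set.add_of_mem hvs]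
      rw [Q_update (PySem.Set.ofList xs)
            (fun k => (((xs ++ [v]).count k : Nat) : Int))
            (fun k => ((xs.count k : Nat) : Int)) v
            (PySem.Set.nodup_ofList xs) hvs ?hfg ?hfv]
      case hfg =>
        intro k _ hk
        have hc : List.count k (xs ++ [v]) = List.count k xs := by
          simp [List.count_append, List.count_singleton']
          exact fun h => hk h.symm
        simp only [hc]
      case hfv =>
        have hc : List.count v (xs ++ [v]) = List.count v xs + 1 := by
          simp [List.count_append]
        simp [hc]
      rw [ih, L1]
    · have hvs : v ∉ PySem.Set.ofList xs := fun h => hv ((PySem.Set.mem_ofList _ _).mp h)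
      rw [PySem.Set.add_of_not_mem hvs, List.map_append, List.map_cons, List.map_nil]
      have hcv : List.count v (xs ++ [v]) = 1 := by
        simp [List.count_append, List.count_eq_zero_of_not_mem hv]
      simp only [hcv, Nat.cast_one]
      have hcongr : (PySem.Set.ofList xs).map (fun k => (k, (((xs ++ [v]).count k : Nat) : Int)))
          = (PySem.Set.ofList xs).map (fun k => (k, ((xs.count k : Nat) : Int))) := by
        apply List.map_congr_left
        intro k hk
        have hkv : k ≠ v := fun h => hvs (h ▸ hk)
        have : (xs ++ [v]).count k = xs.count k := by
          rw [List.count_append]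
          simp [hkv.symm]
        rw [this]
      rw [hcongr]
      have := Q_append_one ((PySem.Set.ofList xs).map (fun k => (k, ((xs.count k : Nat) : Int)))) v 1
      norm_num at this
      rw [this, ih]
      have hsum : ((PySem.Set.ofList xs).map
            ((fun p => if pyIsPal (PySem.Int.bxor p.1 v) then p.2 else 0)
              ∘ (fun k => (k, ((xs.count k : Nat) : Int))))).sum
          = ((PySem.Set.ofList xs).map
            (fun k => if pyIsPal (PySem.Int.bxor v k) then ((xs.count k : Nat) : Int) else 0)).sum := by
        apply congrArg
        apply List.map_congr_left
        intro k _
        simp only [Function.comp]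
        rw [PySem.Int.bxor_comm k v]
      rw [hsum, L1]

-- ===== VERDICT (by name: the statement is the Claim_ definition above) =====
theorem count_palindrome_pairs_spec : Claim_equal_count_palindrome_pairs := by
  intro arr _
  unfold Spec_count_palindrome_pairs count_palindrome_pairs count_palindrome_pairs_alt
  simp only [PySem.List.len_eq]
  rw [PySem.List.foldl_pyRange_zero_pyGetD' arr 0 cppStep (0, PySem.Dict.empty)]
  rw [PySem.Dict.foldl_insert_getD_add_one_eq_counter, B1]
  have : (PySem.Dict.empty : PySem.Dict Int Int) = PySem.Dict.counter ([] : List Int) := rfl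
  rw [this, A1, B2]
  ring
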